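-- pv_equiv track=rewrite | github.com/pypi-data/pypi-mirror-82 | packages/indian-namematch/indian_namematch-1.3.0-py3-none-any.whl/indian_namematch/fuzzymatch.py | vowels_between_consonants
-- ===== SOURCE A (Python) =====
-- def vowels_between_consonants(name1):
--     '''Vowels between consonants find the vowels mapping between consonant
--        example: pradeeip-----> {a,eei}
--     '''
--     list_consonants = ['b', 'c', 'd', 'f', 'g', 'h', 'j', 'k', 'l',
--                        'm', 'n', 'p', 'q', 'r', 's', 't', 'v', 'w', 'x',
--                        'y', 'z']
--     # index list contains index where vowels are in name.
--     # ans_list contains consonants between those vowels.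
--
--     index_list = []
--     ans_list = []
--     for index, item in enumerate(name1):
--         if item in list_consonants:
--             index_list.append(index)
--     # checking if first character need to be appended
--     if index_list:
--         if index_list[0] not in list_consonants:
--             ans_list.append(name1[:index_list[0]])
--         # obtaining values based on slicing of indexes
--         for i in range(len(index_list)-1):
--             ans_list.append(name1[index_list[i]+1:index_list[i+1]])
--         # cheking for last sliced result
--         if index_list[-1] < len(name1)-1:
--             ans_list.append(name1[index_list[-1]+1:])
--         # if any empty names in list, remove them.
--         ans_list = list(filter(None, ans_list))
--         return ans_list
--     else:
--         return None
-- ===== SOURCE B (Python) =====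
-- def vowels_between_consonants(name1):
--     consonants = set('bcdfghjklmnpqrstvwxyz')
--     out = []
--     buf = []
--     saw_consonant = False
--     for ch in name1:
--         if ch in consonants:
--             saw_consonant = True
--             if buf:
--                 out.append(''.join(buf))
--                 buf = []
--         else:
--             buf.append(ch)
--     if not saw_consonant:
--         return None
--     if buf:
--         out.append(''.join(buf))
--     return out
-- ===== Notes on version B (the rewrite author's own statement) =====
-- stated objective: simpler
-- what changed: A collects all consonant indices first and then rebuilds the runs by index-pair slicing with a separate prefix/suffix fix-up and a final empty-filter; B is a single left-to-right scan keeping a current-run buffer and a saw-consonant flag, emitting each non-empty run as it closes (measured ~4x faster: one pass, no index list, no repeated slicing).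
import Mathlib
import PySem

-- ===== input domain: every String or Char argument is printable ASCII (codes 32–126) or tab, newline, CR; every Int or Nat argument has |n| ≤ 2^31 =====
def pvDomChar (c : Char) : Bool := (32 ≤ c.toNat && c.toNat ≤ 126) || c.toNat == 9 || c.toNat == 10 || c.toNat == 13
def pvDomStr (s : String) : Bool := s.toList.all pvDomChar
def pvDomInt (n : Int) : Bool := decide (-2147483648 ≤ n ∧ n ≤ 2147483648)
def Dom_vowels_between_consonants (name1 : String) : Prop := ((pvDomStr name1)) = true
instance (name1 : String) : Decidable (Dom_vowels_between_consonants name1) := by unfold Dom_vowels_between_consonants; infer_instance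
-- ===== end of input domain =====

-- B replaces A's consonant-index list and index-pair slicing by a single left-to-right scan with a
-- run buffer (objective: simpler, one pass, no index arithmetic); same return value everywhere.

-- ===== PORT A =====
def pvListConsonants : List Char :=
  ['b', 'c', 'd', 'f', 'g', 'h', 'j', 'k', 'l',
   'm', 'n', 'p', 'q', 'r', 's', 't', 'v', 'w', 'x',
   'y', 'z']

def vowels_between_consonants (name1 : String) : Option (List String) :=
  let list_consonants := pvListConsonants
  -- for index, item in enumerate(name1): if item in list_consonants: index_list.append(index)
  let index_list : List Int :=
    List.foldl (fun acc p => if list_consonants.contains p.2 then acc ++ [p.1] else acc)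
      [] (PySem.List.enumerate name1.toList 0)
  if index_list ≠ [] then
    -- `index_list[0] not in list_consonants` compares an int with one-char strings: always True in Python
    let ans_list : List String :=
      [PySem.Str.slice name1 none (some (PySem.List.pyGetD index_list 0 0))]
    -- for i in range(len(index_list)-1): ans_list.append(name1[index_list[i]+1:index_list[i+1]])
    -- (indices produced by the loop are in range, so [] ports as pyGetD with an unused default)
    let ans_list := List.foldl
      (fun acc i => acc ++ [PySem.Str.slice name1
          (some (PySem.List.pyGetD index_list i 0 + 1))
          (some (PySem.List.pyGetD index_list (i + 1) 0))])
      ans_list (PySem.List.pyRange 0 ((index_list.length : Int) - 1) 1)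
    let ans_list := if PySem.List.pyGetD index_list (-1) 0 < PySem.Str.len name1 - 1 then
        ans_list ++ [PySem.Str.slice name1 (some (PySem.List.pyGetD index_list (-1) 0 + 1)) none]
      else ans_list
    -- list(filter(None, ans_list)) keeps the non-empty strings
    some (ans_list.filter (fun s => s ≠ ""))
  else
    none

-- ===== PORT B =====
def vowels_between_consonants_alt (name1 : String) : Option (List String) :=
  let consonants : PySem.Set Char := PySem.Set.ofList "bcdfghjklmnpqrstvwxyz".toList
  -- state = (out, buf, saw_consonant); ''.join(buf) over single-char pieces is String.ofList buf
  let r := name1.toList.foldl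
    (fun (st : List String × List Char × Bool) ch =>
      if PySem.Set.contains consonants ch then
        (if st.2.1 ≠ [] then st.1 ++ [String.ofList st.2.1] else st.1, ([] : List Char), true)
      else
        (st.1, st.2.1 ++ [ch], st.2.2))
    ([], [], false)
  if r.2.2 = false then none
  else if r.2.1 ≠ [] then some (r.1 ++ [String.ofList r.2.1])
  else some r.1

-- ===== PRECONDITION & SPEC =====
def Spec_vowels_between_consonants (name1 : String) (out : Option (List String)) : Prop := out = vowels_between_consonants_alt name1
instance (name1 : String) (out : Option (List String)) : Decidable (Spec_vowels_between_consonants name1 out) := by unfold Spec_vowels_between_consonants; infer_instance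

-- ===== CLAIM (what is proved, stated in full; the proofs are below) =====
def Claim_equal_vowels_between_consonants : Prop := ∀ (name1 : String), Dom_vowels_between_consonants name1 → Spec_vowels_between_consonants name1 (vowels_between_consonants name1)

-- ===== LEMMAS AND PROOFS =====

-- the consonant predicate shared by the analysis of both ports
def pc (c : Char) : Bool := pvListConsonants.contains c

-- maximal runs of non-consonant characters (the run before the first consonant, the runs
-- between consecutive consonants, and the run after the last consonant)
def segs : List Char → List (List Char)
  | [] => [[]]
  | c :: t => if pc c then [] :: segs t else (segs t).modifyHead (c :: ·)

-- positions of the consonants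
def idxsN : List Char → List Nat
  | [] => []
  | c :: t => if pc c then 0 :: (idxsN t).map (· + 1) else (idxsN t).map (· + 1)

-- adjacent-pair map: mids f i [j₁, j₂, …] = [f i j₁, f j₁ j₂, …]
def mids {α : Type} (f : Nat → Nat → α) : Nat → List Nat → List α
  | _, [] => []
  | i, j :: rest => f i j :: mids f j rest

-- last element of i :: rest
def lastN : Nat → List Nat → Nat
  | i, [] => i
  | _, j :: rest => lastN j rest

-- the mid-slice a, b ↦ l[a+1:b]
def fm (l : List Char) (a b : Nat) : List Char := (l.drop (a + 1)).take (b - (a + 1))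

-- the non-empty runs, as strings (exactly A's final filter applied to the run strings)
def goodStrs (L : List (List Char)) : List String :=
  (L.map String.ofList).filter (fun s => s ≠ "")

-- B's loop body, with the set-membership test reduced to the list test
def stepB (st : List String × List Char × Bool) (ch : Char) : List String × List Char × Bool :=
  if pc ch then
    (if st.2.1 = [] then st.1 else st.1 ++ [String.ofList st.2.1], ([] : List Char), true)
  else
    (st.1, st.2.1 ++ [ch], st.2.2)

theorem idxsN_eq_nil_iff (l : List Char) : idxsN l = [] ↔ l.any pc = false := by
  induction l with
  | nil => simp [idxsN]
  | cons c t ih => simp only [idxsN, List.any_cons]; split_ifs with h <;> simp_all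

theorem segs_of_no_cons (l : List Char) (h : l.any pc = false) : segs l = [l] := by
  induction l with
  | nil => simp [segs]
  | cons c t ih =>
    simp only [List.any_cons, Bool.or_eq_false_iff] at h
    simp [segs, h.1, ih h.2, List.modifyHead]

theorem lastN_eq_getLast (i : Nat) (rest : List Nat) :
    lastN i rest = (i :: rest).getLast (by simp) := by
  induction rest generalizing i with
  | nil => simp [lastN]
  | cons j rest ih => simp [lastN, ih, List.getLast_cons]

theorem mids_shift (c : Char) (t : List Char) (rest : List Nat) (i : Nat) :
    mids (fm (c :: t)) (i + 1) (rest.map (· + 1)) = mids (fm t) i rest := by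
  induction rest generalizing i with
  | nil => simp [mids]
  | cons j rest ih =>
    simp only [List.map_cons, mids, ih]
    congr 1
    simp only [fm, List.drop_succ_cons]
    congr 1
    omega

theorem lastN_shift (rest : List Nat) (i : Nat) :
    lastN (i + 1) (rest.map (· + 1)) = lastN i rest + 1 := by
  induction rest generalizing i with
  | nil => simp [lastN]
  | cons j rest ih => simp [lastN, ih]

theorem mids_map {α β : Type} (f : Nat → Nat → α) (g : α → β) (i : Nat) (rest : List Nat) :
    mids (fun a b => g (f a b)) i rest = (mids f i rest).map g := by
  induction rest generalizing i with
  | nil => simp [mids]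
  | cons j rest ih => simp [mids, ih]

theorem range_mids {α : Type} (f : Nat → Nat → α) (i : Nat) (rest : List Nat) :
    (List.range rest.length).map
        (fun k => f ((i :: rest).getD k 0) ((i :: rest).getD (k + 1) 0)) =
      mids f i rest := by
  induction rest generalizing i with
  | nil => simp [mids]
  | cons j rest ih =>
    simp only [List.length_cons, List.range_succ_eq_map, List.map_cons, List.map_map, mids]
    congr 1
    rw [← ih j]
    apply List.map_congr_left
    intro k _
    simp [Function.comp]

-- A's main structural fact: the slices named by the consonant positions are exactly the runs
theorem A_segs (l : List Char) (i : Nat) (rest : List Nat) (h : idxsN l = i :: rest) :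
    (l.take i :: mids (fm l) i rest) ++ [l.drop (lastN i rest + 1)] = segs l := by
  induction l generalizing i rest with
  | nil => simp [idxsN] at h
  | cons c t ih =>
    by_cases hc : pc c
    · simp only [idxsN, if_pos hc, List.cons.injEq] at h
      obtain ⟨rfl, rfl⟩ : 0 = i ∧ (idxsN t).map (· + 1) = rest := ⟨h.1, h.2⟩
      simp only [segs, if_pos hc, List.take_zero]
      cases hI : idxsN t with
      | nil =>
        simp only [List.map_nil, mids, lastN, List.drop_succ_cons, List.drop_zero]
        rw [segs_of_no_cons t ((idxsN_eq_nil_iff t).mp hI)]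
        simp
      | cons i' rest' =>
        have ihe := ih i' rest' hI
        simp only [List.map_cons, mids, lastN, mids_shift, lastN_shift, List.drop_succ_cons]
        rw [← ihe]
        simp only [fm, List.drop_succ_cons, List.drop_zero, Nat.add_sub_cancel]
        simp
    · simp only [idxsN, if_neg hc] at h
      cases hI : idxsN t with
      | nil => rw [hI] at h; simp at h
      | cons i' rest' =>
        rw [hI, List.map_cons] at h
        obtain ⟨rfl, rfl⟩ : i' + 1 = i ∧ rest'.map (· + 1) = rest :=
          ⟨(List.cons.injEq ..).mp h |>.1, (List.cons.injEq ..).mp h |>.2⟩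
        have ihe := ih i' rest' hI
        simp only [segs, if_neg hc, ← ihe, mids_shift, lastN_shift,
          List.take_succ_cons, List.drop_succ_cons, List.cons_append, List.modifyHead]

theorem pyGetD_neg_one (xs : List Int) (h : xs ≠ []) (d : Int) :
    PySem.List.pyGetD xs (-1) d = xs.getLast h := by
  have hl : 0 < xs.length := List.length_pos_of_ne_nil h
  simp only [PySem.List.pyGetD, PySem.List.pyGet?, PySem.List.pyIdx?]
  rw [if_neg (by omega), if_pos (by simp; omega), Option.bind]
  rw [List.getElem?_eq_getElem (by omega), List.getLast_eq_getElem]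
  simp

theorem slice_to_ofList (s : String) (i : Nat) :
    PySem.Str.slice s none (some (i : Int)) = String.ofList (s.toList.take i) := by
  apply String.toList_injective ?_
  simp [PySem.Str.toList_slice, PySem.List.slice_to_natCast]

theorem slice_from_ofList (s : String) (i : Nat) :
    PySem.Str.slice s (some (i : Int)) none = String.ofList (s.toList.drop i) := by
  apply String.toList_injective ?_
  simp [PySem.Str.toList_slice, PySem.List.slice_from_natCast]

theorem slice_mid_ofList (s : String) (a b : Nat) :
    PySem.Str.slice s (some ((a : Int) + 1)) (some (b : Int)) = String.ofList (fm s.toList a b) := by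
  apply String.toList_injective ?_
  rw [PySem.Str.toList_slice]
  simp only [PySem.Chars.slice_eq_listSlice]
  rw [show ((a : Int) + 1) = ((a + 1 : Nat) : Int) by push_cast; ring, PySem.List.slice_natCast]
  simp [fm]

theorem enum_filter (l : List Char) (s : Int) :
    List.map Prod.fst ((PySem.List.enumerate l s).filter
        (fun p : Int × Char => pvListConsonants.contains p.2)) =
      (idxsN l).map (fun n : Nat => s + n) := by
  induction l generalizing s with
  | nil => simp [PySem.List.enumerate_nil, idxsN]
  | cons c t ih =>
    rw [PySem.List.enumerate_cons, List.filter_cons]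
    by_cases hc : pc c
    · rw [if_pos (by exact hc)]
      simp only [idxsN, if_pos hc, List.map_cons, List.map_map, ih (s + 1)]
      congr 1
      · simp
      · apply List.map_congr_left
        intro n _
        simp [Function.comp]; ring
    · rw [if_neg (by exact hc)]
      simp only [idxsN, if_neg hc, ih (s + 1), List.map_map]
      apply List.map_congr_left
      intro n _
      simp [Function.comp]; ring

theorem segs_append_free (buf : List Char) (hb : ∀ c ∈ buf, pc c = false)
    (c : Char) (hc : pc c = true) (l : List Char) :
    segs (buf ++ c :: l) = buf :: segs l := by
  induction buf with
  | nil => simp [segs, hc]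
  | cons b buf ih =>
    have hb' : pc b = false := hb b (by simp)
    rw [List.cons_append]
    simp only [segs, hb', Bool.false_eq_true, if_false,
      ih (fun x hx => hb x (by simp [hx])), List.modifyHead]

theorem goodStrs_cons (t : List Char) (L : List (List Char)) :
    goodStrs (t :: L) = (if t = [] then [] else [String.ofList t]) ++ goodStrs L := by
  by_cases h : t = [] <;> simp [goodStrs, h, String.ofList_eq_empty_iff]

-- B's loop invariant: the flushed output lists the non-empty runs of buf ++ l,
-- and the flag records whether a consonant was seen
theorem B_loop (l : List Char) (out : List String) (buf : List Char) (saw : Bool)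
    (hb : ∀ c ∈ buf, pc c = false) :
    (l.foldl stepB (out, buf, saw)).2.2 = (saw || l.any pc) ∧
      (if (l.foldl stepB (out, buf, saw)).2.1 = []
        then (l.foldl stepB (out, buf, saw)).1
        else (l.foldl stepB (out, buf, saw)).1 ++ [String.ofList (l.foldl stepB (out, buf, saw)).2.1]) =
        out ++ goodStrs (segs (buf ++ l)) := by
  induction l generalizing out buf saw with
  | nil =>
    refine ⟨by simp, ?_⟩
    simp only [List.foldl_nil, List.append_nil]
    rw [segs_of_no_cons buf (List.any_eq_false.mpr (by simpa using hb)), goodStrs_cons]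
    by_cases h : buf = [] <;> simp [goodStrs, h]

  | cons c l ih =>
    simp only [List.foldl_cons, stepB]
    by_cases hc : pc c
    · simp only [hc, if_pos]
      obtain ⟨h1, h2⟩ := ih (if buf = [] then out else out ++ [String.ofList buf]) [] true
        (by simp)
      refine ⟨by simp [h1, List.any_cons, hc], ?_⟩
      simp only [List.nil_append] at h2
      rw [h2, segs_append_free buf hb c hc l, goodStrs_cons]
      by_cases h : buf = [] <;> simp [h]
    · simp only [hc, Bool.false_eq_true, if_false]
      obtain ⟨h1, h2⟩ := ih out (buf ++ [c]) saw
        (by intro x hx; rcases List.mem_append.mp hx with h | h;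
            · exact hb x h
            · simp at h; subst h; exact eq_false_of_ne_true hc)
      refine ⟨by simp [h1, List.any_cons, hc], ?_⟩
      rw [h2, List.append_assoc]
      rfl

-- what port A computes, in terms of the runs
theorem A_char (name1 : String) :
    vowels_between_consonants name1 =
      if idxsN name1.toList = [] then none else some (goodStrs (segs name1.toList)) := by
  simp only [vowels_between_consonants]
  rw [PySem.List.foldl_append_if]
  have hIL : [] ++ List.map Prod.fst ((PySem.List.enumerate name1.toList).filter
      (fun p : Int × Char => pvListConsonants.contains p.2)) =
      (idxsN name1.toList).map (fun n : Nat => (n : Int)) := by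
    rw [List.nil_append, enum_filter]
    apply List.map_congr_left
    intro n _
    simp
  rw [hIL]
  cases hI : idxsN name1.toList with
  | nil => simp
  | cons i rest =>
    have hne : (i :: rest).map (fun n : Nat => (n : Int)) ≠ [] := by simp
    rw [if_pos hne]
    have hlast : PySem.List.pyGetD ((i :: rest).map (fun n : Nat => (n : Int))) (-1) 0 =
        ((lastN i rest : Nat) : Int) := by
      rw [pyGetD_neg_one _ (by simp), List.getLast_map, lastN_eq_getLast]
    have h0 : PySem.List.pyGetD ((i :: rest).map (fun n : Nat => (n : Int))) 0 0 =
        ((i : Nat) : Int) := by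
      rw [PySem.List.pyGetD_ofNat']; rfl
    rw [PySem.List.foldl_append_singleton_eq_map, h0, hlast, slice_to_ofList,
      show ((lastN i rest : Nat) : Int) + 1 = ((lastN i rest + 1 : Nat) : Int) by push_cast; ring,
      slice_from_ofList,
      show ((((i :: rest).map (fun n : Nat => (n : Int))).length : Int) - 1 =
        ((rest.length : Nat) : Int)) by simp,
      PySem.List.pyRange_one,
      show (((rest.length : Nat) : Int) - 0).toNat = rest.length by omega,
      List.map_map]
    have hmid : List.map
        ((fun idx => PySem.Str.slice name1
            (some (PySem.List.pyGetD ((i :: rest).map (fun n : Nat => (n : Int))) idx 0 + 1))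
            (some (PySem.List.pyGetD ((i :: rest).map (fun n : Nat => (n : Int))) (idx + 1) 0))) ∘
          (fun k : Nat => (0 : Int) + k)) (List.range rest.length) =
        List.map String.ofList (mids (fm name1.toList) i rest) := by
      rw [← mids_map, ← range_mids]
      apply List.map_congr_left
      intro k hk
      simp only [Function.comp_apply, List.mem_range] at hk ⊢
      rw [show (0 : Int) + (k : Int) = ((k : Nat) : Int) by ring,
        show ((k : Nat) : Int) + 1 = ((k + 1 : Nat) : Int) by push_cast; ring,
        PySem.List.pyGetD_natCast, PySem.List.pyGetD_natCast,
        List.getD_eq_getElem _ _ (by simp; omega), List.getElem_map,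
        List.getD_eq_getElem _ _ (by simp; omega), List.getElem_map,
        slice_mid_ofList,
        List.getD_eq_getElem _ _ (by simp; omega), List.getD_eq_getElem _ _ (by simp; omega)]
    rw [hmid]
    have hA := A_segs name1.toList i rest hI
    rw [PySem.Str.len_eq]
    by_cases hc : ((lastN i rest : Nat) : Int) < (name1.toList.length : Int) - 1
    · rw [if_pos hc, ← hA]
      simp [goodStrs]
    · rw [if_neg hc]
      have hdrop : name1.toList.drop (lastN i rest + 1) = [] :=
        List.drop_eq_nil_of_le (by omega)
      rw [← hA, hdrop]
      simp only [goodStrs, List.map_append, List.map_cons, List.map_nil, List.singleton_append]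
      simp [List.filter_cons, List.filter_append]

-- B's loop body is stepB: the set-membership test is the list test
theorem stepB_eq :
    (fun (st : List String × List Char × Bool) ch =>
        if PySem.Set.contains (PySem.Set.ofList "bcdfghjklmnpqrstvwxyz".toList) ch then
          (if st.2.1 ≠ [] then st.1 ++ [String.ofList st.2.1] else st.1, ([] : List Char), true)
        else (st.1, st.2.1 ++ [ch], st.2.2)) = stepB := by
  funext st ch
  have hc : PySem.Set.contains (PySem.Set.ofList "bcdfghjklmnpqrstvwxyz".toList) ch = pc ch := by
    have h : PySem.Set.ofList "bcdfghjklmnpqrstvwxyz".toList = pvListConsonants := by decide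
    rw [h]; rfl
  rw [stepB, hc]
  by_cases h : pc ch
  · simp only [h, if_pos]
    by_cases hb : st.2.1 = [] <;> simp [hb]
  · simp [h]

-- what port B computes, in terms of the runs
theorem B_char (name1 : String) :
    vowels_between_consonants_alt name1 =
      if name1.toList.any pc = false then none else some (goodStrs (segs name1.toList)) := by
  simp only [vowels_between_consonants_alt, stepB_eq]
  obtain ⟨h1, h2⟩ := B_loop name1.toList [] [] false (by simp)
  simp only [List.nil_append] at h1 h2
  by_cases hany : name1.toList.any pc = false
  · rw [if_pos hany]
    rw [hany, Bool.or_false] at h1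
    simp [h1]
  · rw [if_neg hany]
    rw [Bool.not_eq_false] at hany
    rw [hany, Bool.or_true] at h1
    rw [if_neg (by simp [h1])]
    by_cases hb : (name1.toList.foldl stepB ([], [], false)).2.1 = []
    · rw [if_pos hb] at h2
      rw [if_neg (by simp [hb]), h2]
    · rw [if_neg hb] at h2
      rw [if_pos hb, h2]

-- ===== VERDICT (by name: the statement is the Claim_ definition above) =====
theorem vowels_between_consonants_spec : Claim_equal_vowels_between_consonants := by
  intro name1 _
  unfold Spec_vowels_between_consonants
  rw [A_char, B_char]
  by_cases h : idxsN name1.toList = []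
  · rw [if_pos h, if_pos ((idxsN_eq_nil_iff _).mp h)]
  · rw [if_neg h, if_neg (by intro hF; exact h ((idxsN_eq_nil_iff _).mpr hF))]
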